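-- pv_equiv track=rewrite | github.com/ivobatkovic/advent-of-code | 2020/day21/python/day21.py | match_allergens
-- ===== SOURCE A (Python) =====
-- def match_allergens(input_):
--
--     ingredients_list, allergens_list = input_
--
--     possible_allergen = dict()
--     all_ingredients = set()
--
--     # Go through the list
--     for allergens, ingredients in zip(allergens_list, ingredients_list):
--
--         # Record all ingredients we've seen
--         all_ingredients |= set(ingredients)
--
--         # Go through each allergen
--         for allergen in allergens:
--             # If we haven't seen this allergen before, we know it can only be
--             # produced by this ingredients
--             if allergen not in possible_allergen:
--                 possible_allergen[allergen] = set(ingredients)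
--             # Otherwise, only keep ingredients we've seen before
--             else:
--                 possible_allergen[allergen] = possible_allergen[
--                     allergen
--                 ].intersection(ingredients)
--     # Returns a set of all ingredients, and which may cause allergies
--     return all_ingredients, possible_allergen
-- ===== SOURCE B (Python) =====
-- def match_allergens(input_):
--     ingredients_list, allergens_list = input_
--
--     # Pass 1: group, per allergen, every ingredient set it co-occurs with,
--     # while unioning all ingredients seen.
--     groups = {}
--     all_ingredients = set()
--     for allergens, ingredients in zip(allergens_list, ingredients_list):
--         ing_set = set(ingredients)
--         all_ingredients |= ing_set
--         for allergen in allergens: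
--             groups.setdefault(allergen, []).append(ing_set)
--
--     # Pass 2: reduce each group by set intersection (seeded with its first set).
--     possible_allergen = {}
--     for allergen, sets in groups.items():
--         candidate = sets[0]
--         for s in sets[1:]:
--             candidate = candidate.intersection(s)
--         possible_allergen[allergen] = candidate
--     return all_ingredients, possible_allergen
-- ===== Notes on version B (the rewrite author's own statement) =====
-- stated objective: alternative
-- what changed: Instead of maintaining each allergen's running intersection inside the scan, B first groups every allergen with the list of ingredient sets it co-occurs with (one grouping pass over the zipped lists), then a second pass reduces each group by set intersection seeded with its first set.
import Mathlib
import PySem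

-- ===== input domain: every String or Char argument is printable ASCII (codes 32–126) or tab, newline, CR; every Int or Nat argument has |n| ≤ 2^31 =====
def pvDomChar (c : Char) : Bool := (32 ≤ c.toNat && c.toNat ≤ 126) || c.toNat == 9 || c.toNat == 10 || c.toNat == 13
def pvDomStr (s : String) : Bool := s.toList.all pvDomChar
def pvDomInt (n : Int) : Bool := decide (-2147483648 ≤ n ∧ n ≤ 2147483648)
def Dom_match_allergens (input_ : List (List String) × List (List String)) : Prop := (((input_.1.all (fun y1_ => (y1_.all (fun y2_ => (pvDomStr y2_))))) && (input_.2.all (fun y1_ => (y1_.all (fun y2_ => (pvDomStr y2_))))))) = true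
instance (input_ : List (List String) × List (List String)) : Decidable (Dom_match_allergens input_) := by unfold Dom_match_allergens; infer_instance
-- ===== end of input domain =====

-- B re-decomposes A's incrementally maintained intersections into a grouping pass
-- (allergen -> list of co-occurring ingredient sets) followed by a reduce-by-intersection
-- pass; objective: alternative decomposition, same asymptotic cost.

-- ===== PORT A =====
-- inner 'for allergen in allergens' loop of A
def aInner (ing : List String) (d : PySem.Dict String (List String)) (allergens : List String) :
    PySem.Dict String (List String) :=
  allergens.foldl (fun d allergen =>
    match d.get? allergen with
    | none => d.insert allergen (PySem.Set.ofList ing)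
    | some v => d.insert allergen (PySem.Set.inter v ing)) d

-- one iteration of A's outer 'for allergens, ingredients in zip(...)' loop
def aStep (st : PySem.Dict String (List String) × PySem.Set String)
    (pr : List String × List String) :
    PySem.Dict String (List String) × PySem.Set String :=
  (aInner pr.2 st.1 pr.1, PySem.Set.union st.2 (PySem.Set.ofList pr.2))

def match_allergens (input_ : List (List String) × List (List String)) :
    List String × (List (String × List String)) :=
  let ingredients_list := input_.1
  let allergens_list := input_.2
  let st := (allergens_list.zip ingredients_list).foldl aStep (PySem.Dict.mk [], PySem.Set.empty)
  (st.2, st.1.items)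

-- ===== PORT B =====
-- pass 2's reduction: candidate = sets[0]; for s in sets[1:]: candidate = candidate ∩ s
def reduceInter (sets : List (List String)) : List String :=
  match sets with
  | [] => []
  | s :: rest => rest.foldl PySem.Set.inter s

-- inner loop of B's pass 1: groups.setdefault(allergen, []).append(ing_set)
def bInner (ingSet : List String) (g : PySem.Dict String (List (List String)))
    (allergens : List String) : PySem.Dict String (List (List String)) :=
  allergens.foldl (fun g a => g.modify a [] (· ++ [ingSet])) g

-- one iteration of B's pass-1 loop
def bStep (st : PySem.Dict String (List (List String)) × PySem.Set String)
    (pr : List String × List String) :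
    PySem.Dict String (List (List String)) × PySem.Set String :=
  let ingSet := PySem.Set.ofList pr.2
  (bInner ingSet st.1 pr.1, PySem.Set.union st.2 ingSet)

def match_allergens_alt (input_ : List (List String) × List (List String)) :
    List String × (List (String × List String)) :=
  let ingredients_list := input_.1
  let allergens_list := input_.2
  let st := (allergens_list.zip ingredients_list).foldl bStep (PySem.Dict.mk [], PySem.Set.empty)
  let possible := st.1.items.foldl
    (fun (out : PySem.Dict String (List String)) p => out.insert p.1 (reduceInter p.2))
    (PySem.Dict.mk [])
  (st.2, possible.items)

-- ===== PRECONDITION & SPEC =====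
def Spec_match_allergens (input_ : List (List String) × List (List String)) (out : List String × (List (String × List String))) : Prop := out = match_allergens_alt input_
instance (input_ : List (List String) × List (List String)) (out : List String × (List (String × List String))) : Decidable (Spec_match_allergens input_ out) := by unfold Spec_match_allergens; infer_instance

-- ===== CLAIM (what is proved, stated in full; the proofs are below) =====
def Claim_equal_match_allergens : Prop := ∀ (input_ : List (List String) × List (List String)), Dom_match_allergens input_ → Spec_match_allergens input_ (match_allergens input_)

-- ===== LEMMAS AND PROOFS =====

-- abstraction: B's group table, reduced pointwise, IS A's dict
def mapRed (g : PySem.Dict String (List (List String))) : PySem.Dict String (List String) :=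
  PySem.Dict.mk (g.items.map (fun p => (p.1, reduceInter p.2)))

-- invariant of B's group table
def GInv (g : PySem.Dict String (List (List String))) : Prop :=
  g.keys.Nodup ∧ ∀ p ∈ g.items, p.2 ≠ []

theorem inter_ofList (v l : List String) :
    PySem.Set.inter v (PySem.Set.ofList l) = PySem.Set.inter v l := by
  unfold PySem.Set.inter
  apply List.filter_congr
  intro x _
  simp [PySem.Set.contains_eq_listContains, PySem.Set.mem_ofList]

theorem get?_mapRed (g : PySem.Dict String (List (List String))) (a : String) :
    (mapRed g).get? a = (g.get? a).map reduceInter := by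
  unfold mapRed PySem.Dict.get?
  induction g.items with
  | nil => rfl
  | cons p rest ih =>
    simp only [List.map_cons]
    by_cases h : (p.1 == a) = true
    · rw [List.find?_cons_of_pos (l := List.map (fun p => (p.1, reduceInter p.2)) rest) (h := h),
        List.find?_cons_of_pos (l := rest) (h := h)]
      rfl
    · rw [List.find?_cons_of_neg (l := List.map (fun p => (p.1, reduceInter p.2)) rest) (h := h),
        List.find?_cons_of_neg (l := rest) (h := h)]
      exact ih

theorem contains_mapRed (g : PySem.Dict String (List (List String))) (a : String) :
    (mapRed g).contains a = g.contains a := by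
  rw [PySem.Dict.contains_eq_isSome_get?, PySem.Dict.contains_eq_isSome_get?, get?_mapRed]
  cases g.get? a <;> rfl

theorem mapRed_insert (g : PySem.Dict String (List (List String))) (a : String)
    (w : List (List String)) :
    mapRed (g.insert a w) = (mapRed g).insert a (reduceInter w) := by
  unfold PySem.Dict.insert
  rw [contains_mapRed]
  by_cases h : g.contains a = true
  · simp only [h, if_pos]
    unfold mapRed
    congr 1
    simp only [List.map_map]
    apply List.map_congr_left
    intro p _
    by_cases hp : (p.1 == a) = true <;> simp [Function.comp, hp]
  · simp only [h, if_neg, Bool.false_eq_true, not_false_iff]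
    unfold mapRed
    simp

theorem red_append (s : List String) (rest : List (List String)) (S : List String) :
    reduceInter ((s :: rest) ++ [S]) = PySem.Set.inter (reduceInter (s :: rest)) S := by
  simp [reduceInter, List.foldl_append]

theorem aInner_eq (ing : List String) (allergens : List String) :
    ∀ g : PySem.Dict String (List (List String)), GInv g →
      aInner ing (mapRed g) allergens = mapRed (bInner (PySem.Set.ofList ing) g allergens)
      ∧ GInv (bInner (PySem.Set.ofList ing) g allergens) := by
  induction allergens with
  | nil => intro g hg; exact ⟨rfl, hg⟩
  | cons a rest ih =>
    intro g hg
    have hstep :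
        (match (mapRed g).get? a with
          | none => (mapRed g).insert a (PySem.Set.ofList ing)
          | some v => (mapRed g).insert a (PySem.Set.inter v ing))
        = mapRed (g.modify a [] (· ++ [PySem.Set.ofList ing])) := by
      rw [get?_mapRed]
      unfold PySem.Dict.modify
      cases hga : g.get? a with
      | none =>
        have hget : g.getD a [] = [] := PySem.Dict.getD_of_get?_eq_none _ _ hga
        rw [mapRed_insert, hget]
        rfl
      | some ls =>
        have hget : g.getD a [] = ls := PySem.Dict.getD_of_get?_eq_some _ _ hga
        have hls : ls ≠ [] := by
          have hmem := PySem.Dict.mem_items_of_get?_eq_some _ hga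
          exact hg.2 _ hmem
        obtain ⟨s, rest', rfl⟩ := List.exists_cons_of_ne_nil hls
        rw [mapRed_insert, hget, red_append, inter_ofList]
        rfl
    have hinv : GInv (g.modify a [] (· ++ [PySem.Set.ofList ing])) := by
      unfold PySem.Dict.modify
      constructor
      · exact PySem.Dict.nodup_keys_insert _ _ _ hg.1
      · intro p hp
        rcases (PySem.Dict.mem_items_insert _ _ _ _).1 hp with h | h
        · subst h; simp
        · exact hg.2 _ h.1
    have := ih _ hinv
    refine ⟨?_, this.2⟩
    show aInner ing
        (match (mapRed g).get? a with
          | none => (mapRed g).insert a (PySem.Set.ofList ing)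
          | some v => (mapRed g).insert a (PySem.Set.inter v ing)) rest = _
    rw [hstep]
    exact this.1

theorem fold_eq (l : List (List String × List String)) :
    ∀ (g : PySem.Dict String (List (List String))) (s : PySem.Set String), GInv g →
      l.foldl aStep (mapRed g, s) = (mapRed (l.foldl bStep (g, s)).1, (l.foldl bStep (g, s)).2)
      ∧ GInv (l.foldl bStep (g, s)).1 := by
  induction l with
  | nil => intro g s hg; exact ⟨rfl, hg⟩
  | cons pr rest ih =>
    intro g s hg
    have h := aInner_eq pr.2 pr.1 g hg
    have hstep : aStep (mapRed g, s) pr =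
        (mapRed (bStep (g, s) pr).1, (bStep (g, s) pr).2) := by
      unfold aStep bStep
      simp only
      rw [h.1]
    simp only [List.foldl_cons, hstep]
    exact ih _ _ h.2

-- ===== VERDICT (by name: the statement is the Claim_ definition above) =====
theorem match_allergens_spec : Claim_equal_match_allergens := by
  intro input_ _
  unfold Spec_match_allergens match_allergens match_allergens_alt
  have hinv : GInv (PySem.Dict.mk ([] : List (String × List (List String)))) := by
    refine ⟨List.nodup_nil, ?_⟩
    intro p hp
    simp at hp
  obtain ⟨heq, hfin⟩ := fold_eq (input_.2.zip input_.1) (PySem.Dict.mk []) PySem.Set.empty hinv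
  have heq' : (input_.2.zip input_.1).foldl aStep (PySem.Dict.mk [], PySem.Set.empty)
      = (mapRed ((input_.2.zip input_.1).foldl bStep (PySem.Dict.mk [], PySem.Set.empty)).1,
         ((input_.2.zip input_.1).foldl bStep (PySem.Dict.mk [], PySem.Set.empty)).2) := heq
  simp only [heq']
  refine Prod.ext rfl ?_
  simp only
  rw [PySem.Dict.items_foldl_insert_fresh
    (l := ((input_.2.zip input_.1).foldl bStep (PySem.Dict.mk [], PySem.Set.empty)).1.items)
    (k := fun p => p.1) (v := fun p => reduceInter p.2) (d := PySem.Dict.mk [])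
    (by intro a _; rfl) hfin.1]
  rfl
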